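-- pv_equiv track=rewrite | github.com/taurinrobinson-wq/saoriverse-console | archive/old_structure/emotional_os/core/emotional_framework.py | _extract_primary_emotion
-- ===== SOURCE A (Python) =====
-- from typing import Dict, List, Optional, Any
--
-- def _extract_primary_emotion(signals: List[Dict]) -> str:
--     """Extract primary emotion from signals."""
--     if not signals:
--         return "neutral"
--
--     # Priority: use tone if available
--     for signal in signals:
--         tone = signal.get("tone")
--         if tone and tone != "unknown":
--             return tone
--
--     # Fall back to keyword
--     for signal in signals:
--         keyword = signal.get("keyword")
--         if keyword:
--             return keyword
--
--     return "neutral"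
-- ===== SOURCE B (Python) =====
-- def _extract_primary_emotion(signals):
--     """Extract primary emotion from signals (single pass with keyword fallback)."""
--     first_keyword = None
--     for sig in signals:
--         tone = sig.get("tone")
--         if tone and tone != "unknown":
--             return tone
--         if first_keyword is None:
--             keyword = sig.get("keyword")
--             if keyword:
--                 first_keyword = keyword
--     return first_keyword if first_keyword is not None else "neutral"
-- ===== Notes on version B (the rewrite author's own statement) =====
-- stated objective: simpler
-- what changed: Replaces A's two sequential scans (tone pass, then keyword pass) by a single pass that returns the first valid tone immediately and carries the first truthy keyword as a fallback; the empty-list guard disappears since the fused loop yields 'neutral' naturally.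
import Mathlib
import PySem

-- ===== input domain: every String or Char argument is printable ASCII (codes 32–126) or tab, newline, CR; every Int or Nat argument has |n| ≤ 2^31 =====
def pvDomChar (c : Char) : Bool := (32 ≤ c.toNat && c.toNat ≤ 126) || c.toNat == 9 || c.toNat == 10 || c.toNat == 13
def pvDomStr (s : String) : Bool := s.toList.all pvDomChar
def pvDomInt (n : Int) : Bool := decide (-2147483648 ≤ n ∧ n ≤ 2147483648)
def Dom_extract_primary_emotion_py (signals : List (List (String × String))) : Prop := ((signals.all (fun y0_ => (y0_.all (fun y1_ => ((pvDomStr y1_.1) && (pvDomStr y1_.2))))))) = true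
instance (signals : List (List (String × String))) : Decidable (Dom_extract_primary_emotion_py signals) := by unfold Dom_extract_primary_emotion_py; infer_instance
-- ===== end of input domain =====

-- B fuses A's two sequential scans into one pass carrying a first-keyword fallback (objective: simpler).\nimport Mathlib


-- ===== PORT A =====
def pvToneLoop : List (List (String × String)) → Option String
| [] => none
| s :: rest =>
  match s.lookup "tone" with
  | some t => if t ≠ "" && t ≠ "unknown" then some t else pvToneLoop rest
  | none => pvToneLoop rest

def pvKwLoop : List (List (String × String)) → Option String
| [] => none
| s :: rest =>
  match s.lookup "keyword" with
  | some k => if k ≠ "" then some k else pvKwLoop rest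
  | none => pvKwLoop rest

def extract_primary_emotion_py (signals : List (List (String × String))) : String :=
  if signals = [] then "neutral"
  else
    match pvToneLoop signals with
    | some t => t
    | none =>
      match pvKwLoop signals with
      | some k => k
      | none => "neutral"

-- ===== PORT B =====
def pvAltLoop : List (List (String × String)) → Option String → String
| [], firstKeyword => firstKeyword.getD "neutral"
| s :: rest, firstKeyword =>
  match s.lookup "tone" with
  | some t =>
    if t ≠ "" && t ≠ "unknown" then t
    else pvAltLoop rest (if firstKeyword.isNone then
        (match s.lookup "keyword" with
         | some k => if k ≠ "" then some k else none
         | none => none) else firstKeyword)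
  | none => pvAltLoop rest (if firstKeyword.isNone then
      (match s.lookup "keyword" with
       | some k => if k ≠ "" then some k else none
       | none => none) else firstKeyword)

def extract_primary_emotion_py_alt (signals : List (List (String × String))) : String :=
  pvAltLoop signals none

-- ===== PRECONDITION & SPEC =====
def Spec_extract_primary_emotion_py (signals : List (List (String × String))) (out : String) : Prop := out = extract_primary_emotion_py_alt signals
instance (signals : List (List (String × String))) (out : String) : Decidable (Spec_extract_primary_emotion_py signals out) := by unfold Spec_extract_primary_emotion_py; infer_instance

-- ===== CLAIM (what is proved, stated in full; the proofs are below) =====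
def Claim_equal_extract_primary_emotion_py : Prop := ∀ (signals : List (List (String × String))), Dom_extract_primary_emotion_py signals → Spec_extract_primary_emotion_py signals (extract_primary_emotion_py signals)

-- ===== LEMMAS AND PROOFS =====

-- ===== VERDICT (by name: the statement is the Claim_ definition above) =====
lemma pvAltLoop_char (sigs : List (List (String × String))) (fk : Option String) :
    pvAltLoop sigs fk =
      match pvToneLoop sigs with
      | some t => t
      | none => ((fk.orElse (fun _ => pvKwLoop sigs)).getD "neutral") := by
  induction sigs generalizing fk with
  | nil => cases fk <;> simp [pvAltLoop, pvToneLoop, pvKwLoop]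
  | cons s rest ih =>
    simp only [pvAltLoop, pvToneLoop, pvKwLoop]
    cases hT : s.lookup "tone" with
    | some t =>
      by_cases ht : ¬t = "" ∧ ¬t = "unknown"
      · simp [ht]
      · rw [ih]
        cases fk with
        | some f => simp [ht]
        | none =>
          cases hK : s.lookup "keyword" with
          | some k =>
            by_cases hk : k = ""
            · simp [hk, ht]
            · simp [hk, ht]
          | none => simp [ht]
    | none =>
      rw [ih]
      cases fk with
      | some f => simp
      | none =>
        cases hK : s.lookup "keyword" with
        | some k =>
          by_cases hk : k = ""
          · simp [hk]
          · simp [hk]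
        | none => simp

theorem extract_primary_emotion_py_spec : Claim_equal_extract_primary_emotion_py := by
  intro signals _
  unfold Spec_extract_primary_emotion_py extract_primary_emotion_py extract_primary_emotion_py_alt
  rw [pvAltLoop_char]
  cases signals with
  | nil => simp [pvToneLoop, pvKwLoop]
  | cons s rest =>
    simp only [reduceCtorEq, if_false]
    cases pvToneLoop (s :: rest) with
    | some t => rfl
    | none =>
      cases pvKwLoop (s :: rest) with
      | some k => simp
      | none => simp
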